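-- pv_equiv track=rewrite | github.com/VincentTLe/Research-about-Dickson-Polynomial | scripts/analysis/dickson_polynomial_formulas.py | dickson_mod
-- ===== SOURCE A (Python) =====
-- def dickson_mod(n, x_val, p_mod):
--     """Compute D_n(1, x_val) modulo p_mod using the recurrence (numeric)."""
--     x_val = x_val % p_mod
--     if n == 0:
--         return 2 % p_mod
--     if n == 1:
--         return x_val
--
--     D_prev2 = 2 % p_mod
--     D_prev1 = x_val
--     for i in range(2, n + 1):
--         D_curr = (x_val * D_prev1 - D_prev2) % p_mod
--         D_prev2 = D_prev1
--         D_prev1 = D_curr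
--     return D_prev1
-- ===== SOURCE B (Python) =====
-- def dickson_mod(n, x_val, p_mod):
--     """Dickson D_n(1, x) mod p via Lucas-sequence fast doubling on the bits of n.
--
--     D_n(1, x) is the Lucas sequence V_n(x, 1): V_{2k} = V_k^2 - 2,
--     V_{2k+1} = V_k*V_{k+1} - x, so one pass over the bits of n suffices.
--     """
--     x = x_val % p_mod
--     if n < 2:
--         return 2 % p_mod if n == 0 else x
--     a, b = 2 % p_mod, x  # (V_0, V_1)
--     for bit in bin(n)[2:]:
--         if bit == '1':
--             a, b = (a * b - x) % p_mod, (b * b - 2) % p_mod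
--         else:
--             a, b = (a * a - 2) % p_mod, (a * b - x) % p_mod
--     return a
-- ===== Notes on version B (the rewrite author's own statement) =====
-- stated objective: faster
-- what changed: Replaces the O(n) linear recurrence loop with Lucas-sequence fast doubling (V_2k = V_k^2-2, V_2k+1 = V_k*V_{k+1}-x) over the binary digits of n.
import Mathlib
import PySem

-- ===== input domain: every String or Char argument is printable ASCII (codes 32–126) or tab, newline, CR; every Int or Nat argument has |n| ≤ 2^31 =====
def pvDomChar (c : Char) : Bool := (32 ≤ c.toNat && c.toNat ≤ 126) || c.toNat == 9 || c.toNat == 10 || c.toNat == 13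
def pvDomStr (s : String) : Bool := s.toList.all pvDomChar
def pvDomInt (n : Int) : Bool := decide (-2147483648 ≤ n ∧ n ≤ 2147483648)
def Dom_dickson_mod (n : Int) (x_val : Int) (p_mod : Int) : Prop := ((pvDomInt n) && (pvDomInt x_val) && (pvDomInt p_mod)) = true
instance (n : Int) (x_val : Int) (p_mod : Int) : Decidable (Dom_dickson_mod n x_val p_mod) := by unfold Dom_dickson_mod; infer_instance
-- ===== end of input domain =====

-- B replaces A's O(n) linear-recurrence loop by Lucas-sequence fast doubling over the bits of n (O(log n)).

-- ===== PORT A =====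
def dickson_mod (n : Int) (x_val : Int) (p_mod : Int) : Int :=
  let x := PySem.Int.mod x_val p_mod
  if n == 0 then PySem.Int.mod 2 p_mod
  else if n == 1 then x
  else
    -- D_prev2 = 2 % p; D_prev1 = x; for i in range(2, n+1): …
    let s := (PySem.List.pyRange 2 (n + 1) 1).foldl
      (fun (st : Int × Int) _i =>
        (st.2, PySem.Int.mod (x * st.2 - st.1) p_mod))
      (PySem.Int.mod 2 p_mod, x)
    s.2

-- ===== PORT B =====
-- bin(n)[2:] for n ≥ 1: the binary digits of n, most significant first (true = '1')
def pvBinDigits (m : Nat) : List Bool :=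
  if h : m = 0 then [] else pvBinDigits (m / 2) ++ [decide (m % 2 = 1)]
  termination_by m
  decreasing_by exact Nat.div_lt_self (Nat.pos_of_ne_zero h) (by omega)

def dickson_mod_alt (n : Int) (x_val : Int) (p_mod : Int) : Int :=
  let x := PySem.Int.mod x_val p_mod
  if n < 2 then (if n == 0 then PySem.Int.mod 2 p_mod else x)
  else
    ((pvBinDigits n.toNat).foldl
      (fun (ab : Int × Int) bit =>
        if bit then (PySem.Int.mod (ab.1 * ab.2 - x) p_mod, PySem.Int.mod (ab.2 * ab.2 - 2) p_mod)
        else (PySem.Int.mod (ab.1 * ab.1 - 2) p_mod, PySem.Int.mod (ab.1 * ab.2 - x) p_mod))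
      (PySem.Int.mod 2 p_mod, x)).1

-- ===== PRECONDITION & SPEC =====
-- Pre_: p_mod ≠ 0 — Python's '%' raises ZeroDivisionError when the modulus is 0.
def Pre_dickson_mod (n : Int) (x_val : Int) (p_mod : Int) : Prop := p_mod ≠ 0
instance (n : Int) (x_val : Int) (p_mod : Int) : Decidable (Pre_dickson_mod n x_val p_mod) := by unfold Pre_dickson_mod; infer_instance
def pvWitness_dickson_mod : Int × Int × Int := (10, 3, 7)

def Spec_dickson_mod (n : Int) (x_val : Int) (p_mod : Int) (out : Int) : Prop := out = dickson_mod_alt n x_val p_mod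
instance (n : Int) (x_val : Int) (p_mod : Int) (out : Int) : Decidable (Spec_dickson_mod n x_val p_mod out) := by unfold Spec_dickson_mod; infer_instance

-- ===== CLAIM (what is proved, stated in full; the proofs are below) =====
def Claim_equal_dickson_mod : Prop := ∀ (n : Int) (x_val : Int) (p_mod : Int), Dom_dickson_mod n x_val p_mod → Pre_dickson_mod n x_val p_mod → Spec_dickson_mod n x_val p_mod (dickson_mod n x_val p_mod)

-- ===== LEMMAS AND PROOFS =====

-- The Lucas sequence V_k(x, 1) = D_k(1, x), over the integers.
def lucasV (x : Int) : Nat → Int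
  | 0 => 2
  | 1 => x
  | k + 2 => x * lucasV x (k + 1) - lucasV x k

theorem lucasV_two_step (x : Int) (k : Nat) :
    lucasV x (k + 2) = x * lucasV x (k + 1) - lucasV x k := rfl

-- fmod congruence toolkit
theorem pv_fmod_congr {p a b : Int} (h : Int.ModEq p a b) : a.fmod p = b.fmod p := by
  obtain ⟨k, hk⟩ := (Int.modEq_iff_dvd.mp h)
  have hb : b = a + p * k := by omega
  rw [hb, Int.add_mul_fmod_self_left]

theorem pv_fmod_modEq (a p : Int) : Int.ModEq p (a.fmod p) a := by
  unfold Int.ModEq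
  conv_rhs => rw [← Int.fmod_add_mul_fdiv a p]
  rw [Int.add_mul_emod_self_left]

theorem pv_fmod_fmod (a p : Int) : (a.fmod p).fmod p = a.fmod p :=
  Int.fmod_fmod_of_dvd a dvd_rfl

-- quadratic invariant: V_{k+1}^2 - V_k V_{k+2} = 4 - x^2
theorem lucasV_quad (x : Int) : ∀ k : Nat,
    lucasV x (k + 1) ^ 2 - lucasV x k * lucasV x (k + 2) = 4 - x ^ 2 := by
  intro k
  induction k with
  | zero => simp [lucasV]; ring
  | succ k ih =>
      have h2 : lucasV x (k + 2) = x * lucasV x (k + 1) - lucasV x k := rfl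
      have h3 : lucasV x (k + 3) = x * lucasV x (k + 2) - lucasV x (k + 1) := rfl
      have : lucasV x (k + 1 + 1) ^ 2 - lucasV x (k + 1) * lucasV x (k + 1 + 2) = 4 - x ^ 2 := by
        show lucasV x (k + 2) ^ 2 - lucasV x (k + 1) * lucasV x (k + 3) = 4 - x ^ 2
        linear_combination ih - lucasV x (k + 1) * h3 + lucasV x (k + 2) * h2
      exact this

-- doubling identities
theorem lucasV_doubling (x : Int) : ∀ k : Nat,
    lucasV x (2 * k) = lucasV x k ^ 2 - 2 ∧
    lucasV x (2 * k + 1) = lucasV x k * lucasV x (k + 1) - x := by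
  intro k
  induction k with
  | zero => constructor <;> simp [lucasV] <;> ring
  | succ k ih =>
      obtain ⟨ihe, iho⟩ := ih
      have hq := lucasV_quad x k
      have he2 : lucasV x (2 * k + 2) = x * lucasV x (2 * k + 1) - lucasV x (2 * k) := rfl
      have he3 : lucasV x (2 * k + 3) = x * lucasV x (2 * k + 2) - lucasV x (2 * k + 1) := rfl
      have hk2 : lucasV x (k + 2) = x * lucasV x (k + 1) - lucasV x k := rfl
      constructor
      · show lucasV x (2 * k + 2) = lucasV x (k + 1) ^ 2 - 2
        linear_combination he2 + x * iho - ihe - hq - lucasV x k * hk2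
      · show lucasV x (2 * k + 3) = lucasV x (k + 1) * lucasV x (k + 2) - x
        linear_combination he3 + x * he2 + x ^ 2 * iho - x * ihe - x * hq - iho
          - lucasV x (k + 1) * hk2 - x * lucasV x k * hk2

-- value of a MSB-first bit list
def pvBitsVal (bs : List Bool) (k : Nat) : Nat :=
  bs.foldl (fun k b => 2 * k + (if b then 1 else 0)) k

theorem pvBinDigits_val : ∀ m k : Nat,
    pvBitsVal (pvBinDigits m) k = k * 2 ^ (pvBinDigits m).length + m := by
  intro m
  induction m using Nat.strong_induction_on with
  | _ m ih =>
      intro k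
      by_cases hm : m = 0
      · subst hm; simp [pvBinDigits, pvBitsVal]
      · have hrec : pvBinDigits m = pvBinDigits (m / 2) ++ [decide (m % 2 = 1)] := by
          rw [pvBinDigits]; simp [hm]
        have ih2 := ih (m / 2) (Nat.div_lt_self (Nat.pos_of_ne_zero hm) (by omega)) k
        rw [hrec]
        have happ : pvBitsVal (pvBinDigits (m / 2) ++ [decide (m % 2 = 1)]) k
            = 2 * pvBitsVal (pvBinDigits (m / 2)) k + (if m % 2 = 1 then 1 else 0) := by
          simp [pvBitsVal, List.foldl_append]
        rw [happ, ih (m / 2) (Nat.div_lt_self (Nat.pos_of_ne_zero hm) (by omega)) k]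
        have hlen : (pvBinDigits (m / 2) ++ [decide (m % 2 = 1)]).length
            = (pvBinDigits (m / 2)).length + 1 := by simp
        rw [hlen, pow_succ]
        have hexp : 2 * (k * 2 ^ (pvBinDigits (m / 2)).length + m / 2)
            = k * (2 ^ (pvBinDigits (m / 2)).length * 2) + 2 * (m / 2) := by ring
        rcases Nat.mod_two_eq_zero_or_one m with h | h <;> simp [h] <;> omega

-- B's fold invariant: the state after consuming bits bs from k is (V_{k'} mod p, V_{k'+1} mod p), k' = value of k followed by bs
theorem pv_b_fold (x p : Int) : ∀ (bs : List Bool) (k : Nat),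
    bs.foldl
      (fun (ab : Int × Int) bit =>
        if bit then (PySem.Int.mod (ab.1 * ab.2 - x) p, PySem.Int.mod (ab.2 * ab.2 - 2) p)
        else (PySem.Int.mod (ab.1 * ab.1 - 2) p, PySem.Int.mod (ab.1 * ab.2 - x) p))
      ((lucasV x k).fmod p, (lucasV x (k + 1)).fmod p)
    = ((lucasV x (pvBitsVal bs k)).fmod p, (lucasV x (pvBitsVal bs k + 1)).fmod p) := by
  intro bs
  induction bs with
  | nil => intro k; simp [pvBitsVal]
  | cons b bs ih =>
      intro k
      have hstep :
          (if b then (PySem.Int.mod ((lucasV x k).fmod p * (lucasV x (k + 1)).fmod p - x) p,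
                      PySem.Int.mod ((lucasV x (k + 1)).fmod p * (lucasV x (k + 1)).fmod p - 2) p)
           else (PySem.Int.mod ((lucasV x k).fmod p * (lucasV x k).fmod p - 2) p,
                 PySem.Int.mod ((lucasV x k).fmod p * (lucasV x (k + 1)).fmod p - x) p))
          = ((lucasV x (2 * k + (if b then 1 else 0))).fmod p,
             (lucasV x (2 * k + (if b then 1 else 0) + 1)).fmod p) := by
        obtain ⟨hde, hdo⟩ := lucasV_doubling x k
        obtain ⟨hde', hdo'⟩ := lucasV_doubling x (k + 1)
        have hmm : Int.ModEq p ((lucasV x k).fmod p * (lucasV x (k + 1)).fmod p - x)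
            (lucasV x (2 * k + 1)) := by
          rw [hdo]
          exact Int.ModEq.sub (Int.ModEq.mul (pv_fmod_modEq _ p) (pv_fmod_modEq _ p)) (Int.ModEq.refl x)
        have hee : Int.ModEq p ((lucasV x k).fmod p * (lucasV x k).fmod p - 2)
            (lucasV x (2 * k)) := by
          rw [hde]
          have : lucasV x k ^ 2 - 2 = lucasV x k * lucasV x k - 2 := by ring
          rw [this]
          exact Int.ModEq.sub (Int.ModEq.mul (pv_fmod_modEq _ p) (pv_fmod_modEq _ p)) (Int.ModEq.refl 2)
        have hoo : Int.ModEq p ((lucasV x (k + 1)).fmod p * (lucasV x (k + 1)).fmod p - 2)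
            (lucasV x (2 * k + 2)) := by
          have h22 : 2 * (k + 1) = 2 * k + 2 := by ring
          rw [← h22, hde']
          have : lucasV x (k + 1) ^ 2 - 2 = lucasV x (k + 1) * lucasV x (k + 1) - 2 := by ring
          rw [this]
          exact Int.ModEq.sub (Int.ModEq.mul (pv_fmod_modEq _ p) (pv_fmod_modEq _ p)) (Int.ModEq.refl 2)
        have hoo' : Int.ModEq p ((lucasV x (k + 1)).fmod p * (lucasV x (k + 1)).fmod p - 2)
            (lucasV x (2 * k + 1 + 1)) := hoo
        cases b
        · exact Prod.ext (pv_fmod_congr hee) (pv_fmod_congr hmm)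
        · exact Prod.ext (pv_fmod_congr hmm) (pv_fmod_congr hoo')
      simp only [List.foldl_cons]
      rw [hstep, ih (2 * k + (if b then 1 else 0))]
      simp [pvBitsVal]

-- A's fold invariant: the loop advances the pair one step per element, regardless of the element
theorem pv_a_fold (x p : Int) : ∀ (l : List Int) (j : Nat),
    l.foldl (fun (st : Int × Int) _i => (st.2, PySem.Int.mod (x * st.2 - st.1) p))
      ((lucasV x j).fmod p, (lucasV x (j + 1)).fmod p)
    = ((lucasV x (j + l.length)).fmod p, (lucasV x (j + l.length + 1)).fmod p) := by
  intro l
  induction l with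
  | nil => intro j; simp
  | cons a l ih =>
      intro j
      simp only [List.foldl_cons]
      have hstep : PySem.Int.mod (x * (lucasV x (j + 1)).fmod p - (lucasV x j).fmod p) p
          = (lucasV x (j + 2)).fmod p := by
        simp only [PySem.Int.mod]
        apply pv_fmod_congr
        rw [lucasV_two_step]
        exact Int.ModEq.sub (Int.ModEq.mul (Int.ModEq.refl x) (pv_fmod_modEq _ p)) (pv_fmod_modEq _ p)
      rw [hstep, ih (j + 1)]
      simp only [List.length_cons]
      rw [show j + 1 + l.length = j + (l.length + 1) from by omega]

-- initial state normalisation: x' = (V_1 x') mod p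
theorem pv_init (x_val p : Int) :
    (PySem.Int.mod 2 p, PySem.Int.mod x_val p)
    = ((lucasV (PySem.Int.mod x_val p) 0).fmod p,
       (lucasV (PySem.Int.mod x_val p) 1).fmod p) := by
  simp only [PySem.Int.mod, lucasV]
  exact Prod.ext rfl (pv_fmod_fmod x_val p).symm

-- ===== VERDICT (by name: the statement is the Claim_ definition above) =====
theorem dickson_mod_spec : Claim_equal_dickson_mod := by
  unfold Claim_equal_dickson_mod
  intro n x_val p_mod _hdom _hpre
  unfold Spec_dickson_mod dickson_mod dickson_mod_alt
  set x := PySem.Int.mod x_val p_mod with hx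
  by_cases h0 : n = 0
  · simp [h0]
  · by_cases h1 : n = 1
    · simp [h1]
    · by_cases h2 : n < 2
      · -- n < 0 here: A's loop range is empty and returns x; B returns x
        have hne : (n == 0) = false := by simp [h0]
        have hne1 : (n == 1) = false := by simp [h1]
        have hneg : n + 1 ≤ 2 := by omega
        have hr : PySem.List.pyRange 2 (n + 1) 1 = [] := by
          rw [PySem.List.pyRange_one]
          have : (n + 1 - 2).toNat = 0 := by omega
          rw [this]; simp
        simp [hne, hne1, h2, hr]
      · -- n ≥ 2: both sides equal (V_n x') mod p
        have hn2 : 2 ≤ n := by omega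
        have hne : (n == 0) = false := by simp [h0]
        have hne1 : (n == 1) = false := by simp [h1]
        have hnlt : ¬ n < 2 := by omega
        simp only [hne, hne1, if_neg hnlt, Bool.false_eq_true, if_false]
        rw [pv_init x_val p_mod, ← hx]
        rw [pv_b_fold x p_mod (pvBinDigits n.toNat) 0]
        have hlen : (PySem.List.pyRange 2 (n + 1) 1).length = n.toNat - 1 := by
          rw [PySem.List.length_pyRange_one]; omega
        have hA := pv_a_fold x p_mod (PySem.List.pyRange 2 (n + 1) 1) 0
        rw [hA]
        rw [hlen]
        have hval : pvBitsVal (pvBinDigits n.toNat) 0 = n.toNat := by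
          rw [pvBinDigits_val]; simp
        rw [hval]
        have : 0 + (n.toNat - 1) + 1 = n.toNat := by omega
        rw [this]
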